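-- pv_equiv track=rewrite | github.com/gmc-code/PC-Latex1 | docs/latex_maths/recurring_decimals/stem_leaf_plots/files/stem_and_leaf_btb_maker.py | make_stem_leaf_dict
-- ===== SOURCE A (Python) =====
-- def make_stem_leaf_dict(num_list, interval):
--     stem_leaves_dict = dict()
--     for val in num_list:
--         stem, leaf = divmod(val, interval)
--         if stem not in stem_leaves_dict:
--             stem_leaves_dict[stem] = str(leaf)
--         else:
--             stem_leaves_dict[stem] += " " + str(leaf)
--     return stem_leaves_dict
-- ===== SOURCE B (Python) =====
-- def make_stem_leaf_dict(num_list, interval):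
--     stems = []
--     for val in num_list:
--         s = val // interval
--         if s not in stems:
--             stems.append(s)
--     return {s: " ".join(str(v % interval) for v in num_list if v // interval == s)
--             for s in stems}
-- ===== Notes on version B (the rewrite author's own statement) =====
-- stated objective: alternative
-- what changed: B never builds the result incrementally: it first collects the distinct stems in first-occurrence order, then for each stem makes one gathering pass over the input, joining that stem's leaves with ' '.join in a dict comprehension, instead of A's single dict pass with a first-vs-subsequent string-concatenation branch.
import Mathlib
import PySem

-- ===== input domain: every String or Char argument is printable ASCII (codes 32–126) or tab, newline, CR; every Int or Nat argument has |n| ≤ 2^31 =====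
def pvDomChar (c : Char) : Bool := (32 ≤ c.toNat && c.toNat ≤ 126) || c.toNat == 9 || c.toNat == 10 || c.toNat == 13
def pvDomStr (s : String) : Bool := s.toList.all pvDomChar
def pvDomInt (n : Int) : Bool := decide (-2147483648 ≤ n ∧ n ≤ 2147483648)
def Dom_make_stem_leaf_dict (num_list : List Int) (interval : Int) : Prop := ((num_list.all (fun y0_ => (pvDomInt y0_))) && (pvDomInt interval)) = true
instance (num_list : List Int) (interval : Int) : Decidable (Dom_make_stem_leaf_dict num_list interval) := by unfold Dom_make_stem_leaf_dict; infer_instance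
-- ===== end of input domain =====

-- B first collects the distinct stems in first-occurrence order, then gathers each stem's
-- leaves in a separate filtering pass, replacing A's single dict pass with a membership
-- branch and incremental string concatenation (objective: alternative decomposition).


-- ===== PORT A =====
-- for val in num_list: stem, leaf = divmod(val, interval); branch on membership, concatenate
def make_stem_leaf_dict (num_list : List Int) (interval : Int) : List (Int × String) :=
  (num_list.foldl (fun d val =>
      let stem := PySem.Int.floordiv val interval
      let leaf := PySem.Int.mod val interval
      if d.contains stem = false then
        d.insert stem (PySem.Int.toStr leaf)
      else
        d.insert stem (d.getD stem "" ++ " " ++ PySem.Int.toStr leaf))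
    (PySem.Dict.empty : PySem.Dict Int String)).items

-- ===== PORT B =====
-- pass 1: stems = first-occurrence-ordered distinct stems
-- pass 2 (dict comprehension): for each stem, join the leaves of the values with that stem
def make_stem_leaf_dict_alt (num_list : List Int) (interval : Int) : List (Int × String) :=
  let stems := num_list.foldl (fun acc val =>
      let s := PySem.Int.floordiv val interval
      if s ∈ acc then acc else acc ++ [s]) []
  stems.map (fun s => (s,
    PySem.Str.join " " ((num_list.filter
        (fun v => PySem.Int.floordiv v interval == s)).map
      (fun v => PySem.Int.toStr (PySem.Int.mod v interval)))))

-- ===== PRECONDITION & SPEC =====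
-- Pre_ excludes only interval = 0 with a nonempty num_list, where Python's divmod raises ZeroDivisionError.
def Pre_make_stem_leaf_dict (num_list : List Int) (interval : Int) : Prop := num_list = [] ∨ interval ≠ 0
instance (num_list : List Int) (interval : Int) : Decidable (Pre_make_stem_leaf_dict num_list interval) := by unfold Pre_make_stem_leaf_dict; infer_instance
def pvWitness_make_stem_leaf_dict : List Int × Int := ([3, 7, 12, -4], 10)

def Spec_make_stem_leaf_dict (num_list : List Int) (interval : Int) (out : List (Int × String)) : Prop := out = make_stem_leaf_dict_alt num_list interval
instance (num_list : List Int) (interval : Int) (out : List (Int × String)) : Decidable (Spec_make_stem_leaf_dict num_list interval out) := by unfold Spec_make_stem_leaf_dict; infer_instance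

-- ===== CLAIM (what is proved, stated in full; the proofs are below) =====
def Claim_equal_make_stem_leaf_dict : Prop := ∀ (num_list : List Int) (interval : Int), Dom_make_stem_leaf_dict num_list interval → Pre_make_stem_leaf_dict num_list interval → Spec_make_stem_leaf_dict num_list interval (make_stem_leaf_dict num_list interval)

-- ===== LEMMAS AND PROOFS =====

-- named forms of the two loop bodies and B's two passes (definitionally equal to the ports')
def pvStepA (interval : Int) (d : PySem.Dict Int String) (val : Int) : PySem.Dict Int String :=
  let stem := PySem.Int.floordiv val interval
  let leaf := PySem.Int.mod val interval
  if d.contains stem = false then d.insert stem (PySem.Int.toStr leaf)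
  else d.insert stem (d.getD stem "" ++ " " ++ PySem.Int.toStr leaf)

def pvStemStep (interval : Int) (acc : List Int) (val : Int) : List Int :=
  let s := PySem.Int.floordiv val interval
  if s ∈ acc then acc else acc ++ [s]

def pvStems (interval : Int) (l : List Int) : List Int := l.foldl (pvStemStep interval) []

def pvGather (interval : Int) (l : List Int) (s : Int) : String :=
  PySem.Str.join " " ((l.filter (fun v => PySem.Int.floordiv v interval == s)).map
    (fun v => PySem.Int.toStr (PySem.Int.mod v interval)))

lemma pv_chars_join_append (sep x : List Char) :
    ∀ (l : List (List Char)), l ≠ [] →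
      PySem.Chars.join sep (l ++ [x]) = PySem.Chars.join sep l ++ sep ++ x := by
  intro l hl
  induction l with
  | nil => simp at hl
  | cons p rest ih =>
    cases rest with
    | nil => simp [PySem.Chars.join_cons_cons, PySem.Chars.join_singleton]
    | cons q rest' =>
      have h2 : (q :: rest' : List (List Char)) ≠ [] := by simp
      calc PySem.Chars.join sep ((p :: q :: rest') ++ [x])
          = p ++ sep ++ PySem.Chars.join sep ((q :: rest') ++ [x]) := by
            simpa using PySem.Chars.join_cons_cons sep p q (rest' ++ [x])
        _ = p ++ sep ++ (PySem.Chars.join sep (q :: rest') ++ sep ++ x) := by rw [ih h2]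
        _ = PySem.Chars.join sep (p :: q :: rest') ++ sep ++ x := by
            rw [PySem.Chars.join_cons_cons]; simp [List.append_assoc]

lemma pv_join_singleton (x : String) : PySem.Str.join " " [x] = x := by
  simp [PySem.Str.join, PySem.Chars.join_singleton]

lemma pv_join_append (l : List String) (hl : l ≠ []) (x : String) :
    PySem.Str.join " " (l ++ [x]) = PySem.Str.join " " l ++ " " ++ x := by
  apply String.toList_inj.mp
  have hml : (l.map String.toList) ≠ [] := by simpa using hl
  simp [PySem.Str.join, pv_chars_join_append _ _ _ hml]

lemma pv_mem_stems_foldl (i : Int) :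
    ∀ (l : List Int) (acc : List Int) (s : Int),
      s ∈ l.foldl (pvStemStep i) acc ↔ s ∈ acc ∨ ∃ v ∈ l, PySem.Int.floordiv v i = s := by
  intro l
  induction l with
  | nil => intro acc s; simp
  | cons v rest ih =>
    intro acc s
    simp only [List.foldl_cons]
    rw [ih]
    simp only [pvStemStep, List.mem_cons]
    split_ifs with h
    · constructor
      · rintro (hs | ⟨w, hw, hws⟩)
        · exact Or.inl hs
        · exact Or.inr ⟨w, Or.inr hw, hws⟩
      · rintro (hs | ⟨w, (rfl | hw), hws⟩)
        · exact Or.inl hs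
        · exact Or.inl (hws ▸ h)
        · exact Or.inr ⟨w, hw, hws⟩
    · simp only [List.mem_append, List.mem_singleton]
      constructor
      · rintro ((hs | hs) | ⟨w, hw, hws⟩)
        · exact Or.inl hs
        · exact Or.inr ⟨v, Or.inl rfl, hs.symm⟩
        · exact Or.inr ⟨w, Or.inr hw, hws⟩
      · rintro (hs | ⟨w, (rfl | hw), hws⟩)
        · exact Or.inl (Or.inl hs)
        · exact Or.inl (Or.inr hws.symm)
        · exact Or.inr ⟨w, hw, hws⟩

lemma pv_mem_stems (i : Int) (l : List Int) (s : Int) :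
    s ∈ pvStems i l ↔ ∃ v ∈ l, PySem.Int.floordiv v i = s := by
  simpa [pvStems] using pv_mem_stems_foldl i l [] s

lemma pv_nodup_stems_foldl (i : Int) :
    ∀ (l : List Int) (acc : List Int), acc.Nodup → (l.foldl (pvStemStep i) acc).Nodup := by
  intro l
  induction l with
  | nil => intro acc h; simpa using h
  | cons v rest ih =>
    intro acc h
    simp only [List.foldl_cons]
    apply ih
    simp only [pvStemStep]
    split_ifs with hm
    · exact h
    · rw [← List.concat_eq_append, List.nodup_concat]
      exact ⟨hm, h⟩

lemma pv_nodup_stems (i : Int) (l : List Int) : (pvStems i l).Nodup :=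
  pv_nodup_stems_foldl i l [] List.nodup_nil

lemma pv_stems_append (i : Int) (l : List Int) (v : Int) :
    pvStems i (l ++ [v]) =
      if PySem.Int.floordiv v i ∈ pvStems i l then pvStems i l
      else pvStems i l ++ [PySem.Int.floordiv v i] := by
  simp [pvStems, List.foldl_append, pvStemStep]

lemma pv_gather_hit (i : Int) (l : List Int) (v : Int) (s : Int)
    (h : PySem.Int.floordiv v i = s) (hs : s ∈ pvStems i l) :
    pvGather i (l ++ [v]) s = pvGather i l s ++ " " ++ PySem.Int.toStr (PySem.Int.mod v i) := by
  obtain ⟨w, hw, hws⟩ := (pv_mem_stems i l s).mp hs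
  have hne : (l.filter (fun u => PySem.Int.floordiv u i == s)).map
      (fun u => PySem.Int.toStr (PySem.Int.mod u i)) ≠ [] := by
    have : w ∈ l.filter (fun u => PySem.Int.floordiv u i == s) :=
      List.mem_filter.mpr ⟨hw, by simp [hws]⟩
    intro hcon
    simp only [List.map_eq_nil_iff] at hcon
    rw [hcon] at this; simp at this
  simp only [pvGather, List.filter_append, List.filter_cons, List.filter_nil]
  rw [if_pos (by simp [h])]
  simp only [List.map_append, List.map_cons, List.map_nil]
  exact pv_join_append _ hne _

lemma pv_gather_miss (i : Int) (l : List Int) (v : Int) (s : Int)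
    (h : PySem.Int.floordiv v i ≠ s) :
    pvGather i (l ++ [v]) s = pvGather i l s := by
  simp only [pvGather, List.filter_append, List.filter_cons, List.filter_nil]
  rw [if_neg (by simpa using h)]
  simp

lemma pv_gather_fresh (i : Int) (l : List Int) (v : Int) (s : Int)
    (h : PySem.Int.floordiv v i = s) (hs : s ∉ pvStems i l) :
    pvGather i (l ++ [v]) s = PySem.Int.toStr (PySem.Int.mod v i) := by
  have hfil : l.filter (fun u => PySem.Int.floordiv u i == s) = [] := by
    rw [List.filter_eq_nil_iff]
    intro w hw hws
    exact hs ((pv_mem_stems i l s).mpr ⟨w, hw, by simpa using hws⟩)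
  simp only [pvGather, List.filter_append, hfil, List.filter_cons, List.filter_nil]
  rw [if_pos (by simp [h])]
  simpa using pv_join_singleton _

lemma pv_main (i : Int) (l : List Int) :
    (l.foldl (pvStepA i) PySem.Dict.empty).items
      = (pvStems i l).map (fun s => (s, pvGather i l s)) := by
  induction l using List.reverseRecOn with
  | nil => rfl
  | append_singleton l v ih =>
    set D := l.foldl (pvStepA i) (PySem.Dict.empty : PySem.Dict Int String) with hD
    set s := PySem.Int.floordiv v i with hsdef
    set x := PySem.Int.toStr (PySem.Int.mod v i) with hx
    have hkeys : D.keys = pvStems i l := by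
      simp only [PySem.Dict.keys, ih, List.map_map]
      have hid : (pvStems i l).map ((fun x => x.1) ∘ fun s => ((s, pvGather i l s) : Int × String))
          = (pvStems i l).map id := List.map_congr_left (fun t _ => rfl)
      rw [hid, List.map_id]
    have hnd : D.keys.Nodup := by rw [hkeys]; exact pv_nodup_stems i l
    have hfold : (l ++ [v]).foldl (pvStepA i) PySem.Dict.empty = pvStepA i D v := by
      rw [List.foldl_append]; rfl
    rw [hfold]
    by_cases hs : s ∈ pvStems i l
    · -- existing stem: in-place overwrite vs unchanged stem list
      have hc : D.contains s = true := by
        rw [PySem.Dict.contains_eq_decide_mem_keys, hkeys]; simpa using hs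
      have hgD : D.getD s "" = pvGather i l s := by
        apply PySem.Dict.getD_of_mem_items D _ hnd
        rw [ih]; exact List.mem_map.mpr ⟨s, hs, rfl⟩
      have hstep : (pvStepA i D v).items
          = D.items.map (fun p => if p.1 == s then (s, D.getD s "" ++ " " ++ x) else p) := by
        simp only [pvStepA, ← hsdef, ← hx, hc]
        rw [if_neg (by simp)]
        exact PySem.Dict.items_insert_of_contains D _ hc
      rw [hstep, ih, List.map_map, pv_stems_append, if_pos (by rw [← hsdef]; exact hs)]
      apply List.map_congr_left
      intro t ht
      by_cases hts : t = s
      · subst hts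
        simp only [Function.comp]
        rw [if_pos (by simp), hgD, pv_gather_hit i l v s hsdef.symm hs, hx]
      · simp only [Function.comp]
        rw [if_neg (by simpa using hts), pv_gather_miss i l v t (fun h => hts (hsdef.trans h).symm)]
    · -- fresh stem: both append
      have hc : D.contains s = false := by
        rw [PySem.Dict.contains_eq_decide_mem_keys, hkeys]; simpa using hs
      have hstep : (pvStepA i D v).items = D.items ++ [(s, x)] := by
        simp only [pvStepA, ← hsdef, ← hx, hc]
        rw [if_pos trivial]
        exact PySem.Dict.items_insert_of_not_contains D _ hc
      rw [hstep, ih, pv_stems_append, if_neg (by rw [← hsdef]; exact hs), List.map_append]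
      congr 1
      · apply List.map_congr_left
        intro t ht
        rw [pv_gather_miss i l v t (fun h => hs (by rw [hsdef, h]; exact ht))]
      · simp only [List.map_cons, List.map_nil]
        rw [pv_gather_fresh i l v s rfl hs, ← hx]

-- ===== VERDICT (by name: the statement is the Claim_ definition above) =====
theorem make_stem_leaf_dict_spec : Claim_equal_make_stem_leaf_dict := by
  intro num_list interval _ _
  unfold Spec_make_stem_leaf_dict make_stem_leaf_dict make_stem_leaf_dict_alt
  exact pv_main interval num_list
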